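-- pv_equiv track=rewrite | github.com/organvm-iv-taxis/orchestration-start-here | scripts/project-progress.py | resolve_organ
-- ===== SOURCE A (Python) =====
-- _ORGAN_ALIASES: dict[str, str] = {
--     "I": "ORGAN-I", "1": "ORGAN-I",
--     "II": "ORGAN-II", "2": "ORGAN-II",
--     "III": "ORGAN-III", "3": "ORGAN-III",
--     "IV": "ORGAN-IV", "4": "ORGAN-IV",
--     "V": "ORGAN-V", "5": "ORGAN-V",
--     "VI": "ORGAN-VI", "6": "ORGAN-VI",
--     "VII": "ORGAN-VII", "7": "ORGAN-VII",
--     "META": "META-ORGANVM", "M": "META-ORGANVM",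
-- }
--
-- def resolve_organ(raw: str) -> str:
--     """Normalize organ argument to canonical ID."""
--     upper = raw.upper().replace("-", "")
--     if upper in _ORGAN_ALIASES:
--         return _ORGAN_ALIASES[upper]
--     for canonical in ("ORGAN-I", "ORGAN-II", "ORGAN-III", "ORGAN-IV",
--                       "ORGAN-V", "ORGAN-VI", "ORGAN-VII", "META-ORGANVM"):
--         if upper == canonical.replace("-", ""):
--             return canonical
--     return raw.upper()
-- ===== SOURCE B (Python) =====
-- _ROMAN = ("I", "II", "III", "IV", "V", "VI", "VII")
--
--
-- def resolve_organ(raw: str) -> str: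
--     """Normalize organ argument to canonical ID (parse, not table lookup).
--
--     Strip hyphens, peel an optional ORGAN prefix, convert a lone digit 1-7
--     to its Roman numeral, and rebuild the canonical ID from the numeral.
--     """
--     upper = raw.upper()
--     key = upper.replace("-", "")
--     if key in ("META", "M", "METAORGANVM"):
--         return "META-ORGANVM"
--     prefixed = key.startswith("ORGAN")
--     body = key[5:] if prefixed else key
--     if not prefixed and len(body) == 1 and "1" <= body <= "7":
--         body = _ROMAN[ord(body) - ord("1")]
--     if body in _ROMAN:
--         return "ORGAN-" + body
--     return upper
-- ===== Notes on version B (the rewrite author's own statement) =====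
-- stated objective: alternative
-- what changed: Replaces A's alias-dict lookup followed by a scan of the canonical tuple with a table-free parser: strip hyphens, peel an optional ORGAN prefix, convert a lone digit 1-7 to its Roman numeral by arithmetic on its code point, and rebuild the canonical ID from the numeral.
import Mathlib
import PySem

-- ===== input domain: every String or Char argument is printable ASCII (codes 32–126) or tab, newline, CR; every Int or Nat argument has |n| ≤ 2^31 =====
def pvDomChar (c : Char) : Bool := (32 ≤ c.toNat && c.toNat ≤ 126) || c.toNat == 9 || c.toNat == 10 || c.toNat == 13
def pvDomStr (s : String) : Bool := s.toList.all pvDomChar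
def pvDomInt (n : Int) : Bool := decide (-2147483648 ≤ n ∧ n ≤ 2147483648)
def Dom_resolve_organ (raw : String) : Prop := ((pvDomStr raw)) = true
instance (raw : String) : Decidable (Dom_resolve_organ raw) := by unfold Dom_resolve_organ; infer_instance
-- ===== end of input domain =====

-- B replaces A's two-table lookup (alias dict, then scan of the canonical tuple) by a parser:
-- strip hyphens, peel an optional ORGAN prefix, turn a lone digit 1-7 into its Roman numeral,
-- and rebuild the canonical ID; objective: alternative (different algorithm, similar cost).


-- ===== PORT A =====
-- module constant _ORGAN_ALIASES
def pvAliasList : List (String × String) :=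
  [("I","ORGAN-I"),("1","ORGAN-I"),("II","ORGAN-II"),("2","ORGAN-II"),
   ("III","ORGAN-III"),("3","ORGAN-III"),("IV","ORGAN-IV"),("4","ORGAN-IV"),
   ("V","ORGAN-V"),("5","ORGAN-V"),("VI","ORGAN-VI"),("6","ORGAN-VI"),
   ("VII","ORGAN-VII"),("7","ORGAN-VII"),("META","META-ORGANVM"),("M","META-ORGANVM")]

def organAliases : PySem.Dict String String := PySem.Dict.ofList pvAliasList

-- the tuple A's loop iterates over
def pvCanonicals : List String :=
  ["ORGAN-I","ORGAN-II","ORGAN-III","ORGAN-IV","ORGAN-V","ORGAN-VI","ORGAN-VII","META-ORGANVM"]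

def resolve_organ (raw : String) : String :=
  let upper := PySem.Str.replace (PySem.Str.upper raw) "-" ""
  match organAliases.get? upper with
  | some v => v
  | none =>
    -- the for-loop with early return = first canonical whose dehyphenation equals upper
    match pvCanonicals.find? (fun c => upper == PySem.Str.replace c "-" "") with
    | some c => c
    | none => PySem.Str.upper raw

-- ===== PORT B =====
-- module constant _ROMAN (Source B)
def pvRoman : List String := ["I","II","III","IV","V","VI","VII"]

def resolve_organ_alt (raw : String) : String :=
  let upper := PySem.Str.upper raw
  let key := PySem.Str.replace upper "-" ""
  if key = "META" ∨ key = "M" ∨ key = "METAORGANVM" then "META-ORGANVM"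
  else
    let prefixed := PySem.Str.startswith key "ORGAN"
    let body := if prefixed then PySem.Str.slice key (some 5) none else key
    -- Python's '"1" <= body <= "7"' on str is code-point lexicographic: exactly '<' on toList
    -- (a <= b is not (b < a)); 'ord(body) - ord("1")' for the guaranteed 1-char body is the
    -- code of its sole char minus 49 (exact under the len == 1 guard).
    let body2 :=
      if prefixed = false ∧ PySem.Str.len body = 1 ∧
         ¬ body.toList < "1".toList ∧ ¬ "7".toList < body.toList
      then pvRoman.getD ((body.toList.headD '1').toNat - '1'.toNat) body
      else body
    if body2 ∈ pvRoman then "ORGAN-" ++ body2 else upper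

-- ===== PRECONDITION & SPEC =====
def Spec_resolve_organ (raw : String) (out : String) : Prop := out = resolve_organ_alt raw
instance (raw : String) (out : String) : Decidable (Spec_resolve_organ raw out) := by unfold Spec_resolve_organ; infer_instance

-- ===== CLAIM =====
def Claim_equal_resolve_organ : Prop := ∀ (raw : String), Dom_resolve_organ raw → Spec_resolve_organ raw (resolve_organ raw)

-- ===== LEMMAS AND PROOFS =====

-- every dehyphenated key either program can react to
def pvKeys : List String :=
  ["I","1","II","2","III","3","IV","4","V","5","VI","6","VII","7","META","M","METAORGANVM",
   "ORGANI","ORGANII","ORGANIII","ORGANIV","ORGANV","ORGANVI","ORGANVII"]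

theorem singleton_lt_singleton (a b : Char) : ([a] : List Char) < [b] ↔ a < b := by
  constructor
  · intro h
    cases h with
    | cons h' => cases h'
    | rel h' => exact h'
  · intro h
    exact List.Lex.rel h

theorem char_lt_iff (a b : Char) : a < b ↔ a.toNat < b.toNat := by
  constructor
  · intro h; exact h
  · intro h; exact h

theorem mem_of_toList (s : String) (l : List Char) (h : s.toList = l)
    (hl : l ∈ pvKeys.map String.toList) : s ∈ pvKeys := by
  obtain ⟨x, hx, he⟩ := List.mem_map.mp hl
  exact (String.ext (h.trans he.symm)) ▸ hx

theorem core_eq (u k : String) :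
    (match organAliases.get? k with
     | some v => v
     | none =>
       match pvCanonicals.find? (fun c => k == PySem.Str.replace c "-" "") with
       | some c => c
       | none => u)
    =
    (if k = "META" ∨ k = "M" ∨ k = "METAORGANVM" then "META-ORGANVM"
     else
       let prefixed := PySem.Str.startswith k "ORGAN"
       let body := if prefixed then PySem.Str.slice k (some 5) none else k
       let body2 :=
         if prefixed = false ∧ PySem.Str.len body = 1 ∧
            ¬ body.toList < "1".toList ∧ ¬ "7".toList < body.toList
         then pvRoman.getD ((body.toList.headD '1').toNat - '1'.toNat) body
         else body
       if body2 ∈ pvRoman then "ORGAN-" ++ body2 else u) := by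
  by_cases hS : k ∈ pvKeys
  · fin_cases hS <;> rfl
  · -- k matches nothing: both sides fall through to u
    have hA : organAliases.get? k = none := by
      unfold PySem.Dict.get?
      rw [Option.map_eq_none_iff, List.find?_eq_none]
      intro p hp
      simp only [beq_iff_eq]
      intro hk
      subst hk
      fin_cases hp <;> exact hS (by decide)
    have hC : pvCanonicals.find? (fun c => k == PySem.Str.replace c "-" "") = none := by
      rw [List.find?_eq_none]
      intro c hc
      simp only [beq_iff_eq]
      intro hk
      subst hk
      fin_cases hc <;> exact hS (by decide)
    rw [hA, hC]
    have hMeta : ¬ (k = "META" ∨ k = "M" ∨ k = "METAORGANVM") := by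
      rintro (rfl | rfl | rfl) <;> exact hS (by decide)
    rw [if_neg hMeta]
    by_cases hpre : PySem.Str.startswith k "ORGAN" = true
    · -- ORGAN-prefixed but not a canonical: the peeled body is no Roman numeral
      obtain ⟨t, ht⟩ : "ORGAN".toList <+: k.toList :=
        (PySem.Chars.startswith_iff _ _).mp (by simpa using hpre)
      have hbody : (PySem.Str.slice k (some 5) none).toList = t := by
        rw [PySem.Str.toList_slice, PySem.Chars.slice_eq_listSlice,
            PySem.List.slice_from _ (by norm_num), ← ht]
        rfl
      simp only [hpre, if_true, Bool.true_eq_false, false_and, if_false]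
      rw [if_neg]
      intro hmem
      simp only [pvRoman, List.mem_cons, List.not_mem_nil, or_false] at hmem
      rcases hmem with h | h | h | h | h | h | h <;>
      · have h2 := congrArg String.toList h
        rw [hbody] at h2
        refine hS (mem_of_toList k k.toList rfl ?_)
        rw [← ht, h2]
        decide
    · simp only [Bool.not_eq_true] at hpre
      simp only [hpre, Bool.false_eq_true, if_false, true_and]
      by_cases hd : PySem.Str.len k = 1 ∧ ¬ k.toList < "1".toList ∧ ¬ "7".toList < k.toList
      · exfalso
        obtain ⟨h1, hlo, hhi⟩ := hd
        rw [PySem.Str.len_eq] at h1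
        have h1' : k.toList.length = 1 := by exact_mod_cast h1
        obtain ⟨c, hk⟩ := List.length_eq_one_iff.mp h1'
        rw [hk] at hlo hhi
        have hlo' : ¬ c < '1' := fun h => hlo ((singleton_lt_singleton c '1').mpr h)
        have hhi' : ¬ '7' < c := fun h => hhi ((singleton_lt_singleton '7' c).mpr h)
        have h49 : 49 ≤ c.toNat := by
          by_contra hc
          exact hlo' ((char_lt_iff c '1').mpr (by simp only [show '1'.toNat = 49 from rfl]; omega))
        have h55 : c.toNat ≤ 55 := by
          by_contra hc
          exact hhi' ((char_lt_iff '7' c).mpr (by simp only [show '7'.toNat = 55 from rfl]; omega))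
        have hc7 : c ∈ (['1','2','3','4','5','6','7'] : List Char) := by
          interval_cases hn : c.toNat <;>
          · have : c = Char.ofNat c.toNat := by
              rw [Char.ofNat_toNat]
            rw [this, hn]
            decide
        refine hS (mem_of_toList k k.toList rfl ?_)
        rw [hk]
        fin_cases hc7 <;> decide
      · rw [if_neg hd, if_neg]
        intro hmem
        simp only [pvRoman, List.mem_cons, List.not_mem_nil, or_false] at hmem
        rcases hmem with rfl | rfl | rfl | rfl | rfl | rfl | rfl <;> exact hS (by decide)

theorem resolve_organ_eq (raw : String) : resolve_organ raw = resolve_organ_alt raw := by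
  unfold resolve_organ resolve_organ_alt
  exact core_eq (PySem.Str.upper raw) (PySem.Str.replace (PySem.Str.upper raw) "-" "")

-- ===== VERDICT =====
theorem resolve_organ_spec : Claim_equal_resolve_organ := by
  intro raw _
  unfold Spec_resolve_organ
  exact resolve_organ_eq raw
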